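-- pv_equiv track=rewrite | github.com/yerin03/PS_python | October_First_week/CatchTail.py | throw_ball
-- ===== SOURCE A (Python) =====
-- def throw_ball(trajectory, teams):
--     for tpos in trajectory:  # 궤적 순
--         for x in range(len(teams)):
--             for idx, pos in enumerate(teams[x]):
--                 if tuple(pos) == tpos:  # 가장 먼저 맞은 닝겐
--                     teams[x] = teams[x][::-1]  # reverse
--                     return (idx + 1) * (idx + 1)
--     return 0
-- ===== SOURCE B (Python) =====
-- def throw_ball(trajectory, teams):
--     first = {}
--     for x, team in enumerate(teams):
--         for idx, pos in enumerate(team):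
--             key = tuple(pos)
--             if key not in first:
--                 first[key] = (x, idx)
--     for tpos in trajectory:
--         hit = first.get(tuple(tpos))
--         if hit is not None:
--             x, idx = hit
--             teams[x] = teams[x][::-1]
--             return (idx + 1) * (idx + 1)
--     return 0
-- ===== Notes on version B (the rewrite author's own statement) =====
-- stated objective: faster
-- what changed: Replaces A's rescan of every team member for each trajectory point with a dict mapping position to its first (team, index) built once, then a single-pass trajectory lookup.
import Mathlib
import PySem

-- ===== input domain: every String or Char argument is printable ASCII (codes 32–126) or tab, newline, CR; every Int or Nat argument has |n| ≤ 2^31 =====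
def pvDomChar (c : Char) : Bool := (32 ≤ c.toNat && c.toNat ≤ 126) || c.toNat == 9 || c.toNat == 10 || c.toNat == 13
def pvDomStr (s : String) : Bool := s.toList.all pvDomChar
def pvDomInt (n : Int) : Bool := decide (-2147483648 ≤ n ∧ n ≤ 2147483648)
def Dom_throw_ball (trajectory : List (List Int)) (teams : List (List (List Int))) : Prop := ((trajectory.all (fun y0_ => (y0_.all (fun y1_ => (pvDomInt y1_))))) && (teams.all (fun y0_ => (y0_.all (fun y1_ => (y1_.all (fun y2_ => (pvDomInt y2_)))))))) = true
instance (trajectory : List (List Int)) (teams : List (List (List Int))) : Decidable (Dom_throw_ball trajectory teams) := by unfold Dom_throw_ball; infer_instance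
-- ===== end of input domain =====

-- B replaces A's per-trajectory-point rescan of all team members by a dict position→first (team,index)
-- built once plus a single-pass trajectory lookup (asymptotically faster). Equivalence is about the
-- RETURN value; the in-place reversal of the hit team is performed identically by both Pythons but is
-- not modeled in the ports.

-- ===== PORT A =====
-- inner loop: 'for idx, pos in enumerate(teams[x]): if tuple(pos) == tpos: return (idx+1)*(idx+1)'
def aFindTeam (team : List (List Int)) (tpos : List Int) (idx : Int) : Option Int :=
  match team with
  | [] => none
  | pos :: rest => if pos == tpos then some ((idx + 1) * (idx + 1)) else aFindTeam rest tpos (idx + 1)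

-- middle loop: 'for x in range(len(teams)): …' (scans the teams in order)
def aScanTeams (teams : List (List (List Int))) (tpos : List Int) : Option Int :=
  match teams with
  | [] => none
  | team :: rest =>
    match aFindTeam team tpos 0 with
    | some v => some v
    | none => aScanTeams rest tpos

def throw_ball (trajectory : List (List Int)) (teams : List (List (List Int))) : Int :=
  match trajectory with
  | [] => 0
  | tpos :: rest =>
    match aScanTeams teams tpos with
    | some v => v
    | none => throw_ball rest teams

-- ===== PORT B =====
-- 'for idx, pos in enumerate(team): if key not in first: first[key] = (x, idx)'
def bInsertTeam (d : PySem.Dict (List Int) (Int × Int)) (x : Int) (team : List (List Int)) (idx : Int) :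
    PySem.Dict (List Int) (Int × Int) :=
  match team with
  | [] => d
  | pos :: rest => bInsertTeam (if d.contains pos then d else d.insert pos (x, idx)) x rest (idx + 1)

-- 'for x, team in enumerate(teams): …'
def bBuild (d : PySem.Dict (List Int) (Int × Int)) (x : Int) (teams : List (List (List Int))) :
    PySem.Dict (List Int) (Int × Int) :=
  match teams with
  | [] => d
  | team :: rest => bBuild (bInsertTeam d x team 0) (x + 1) rest

-- 'for tpos in trajectory: hit = first.get(tuple(tpos)); if hit is not None: return (idx+1)*(idx+1)'
def bLookup (d : PySem.Dict (List Int) (Int × Int)) (trajectory : List (List Int)) : Int :=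
  match trajectory with
  | [] => 0
  | tpos :: rest =>
    match d.get? tpos with
    | some (_, idx) => (idx + 1) * (idx + 1)
    | none => bLookup d rest

def throw_ball_alt (trajectory : List (List Int)) (teams : List (List (List Int))) : Int :=
  bLookup (bBuild PySem.Dict.empty 0 teams) trajectory

-- ===== PRECONDITION & SPEC =====
def Spec_throw_ball (trajectory : List (List Int)) (teams : List (List (List Int))) (out : Int) : Prop := out = throw_ball_alt trajectory teams
instance (trajectory : List (List Int)) (teams : List (List (List Int))) (out : Int) : Decidable (Spec_throw_ball trajectory teams out) := by unfold Spec_throw_ball; infer_instance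

-- ===== CLAIM (what is proved, stated in full; the proofs are below) =====
def Claim_equal_throw_ball : Prop := ∀ (trajectory : List (List Int)) (teams : List (List (List Int))), Dom_throw_ball trajectory teams → Spec_throw_ball trajectory teams (throw_ball trajectory teams)

-- ===== LEMMAS AND PROOFS =====

-- first matching index of tpos in a single team (the quantity both programs track)
def tIdx (team : List (List Int)) (tpos : List Int) (idx : Int) : Option Int :=
  match team with
  | [] => none
  | pos :: rest => if pos == tpos then some idx else tIdx rest tpos (idx + 1)

-- first (team number, index) of tpos over the teams
def gFirst (teams : List (List (List Int))) (tpos : List Int) (x : Int) : Option (Int × Int) :=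
  match teams with
  | [] => none
  | team :: rest =>
    match tIdx team tpos 0 with
    | some i => some (x, i)
    | none => gFirst rest tpos (x + 1)

lemma aFindTeam_eq (team : List (List Int)) (tpos : List Int) (idx : Int) :
    aFindTeam team tpos idx = (tIdx team tpos idx).map (fun i => (i + 1) * (i + 1)) := by
  induction team generalizing idx with
  | nil => rfl
  | cons pos rest ih =>
    simp only [aFindTeam, tIdx]
    by_cases h : pos == tpos <;> simp [h, ih]

lemma bInsertTeam_get? (team : List (List Int)) (d : PySem.Dict (List Int) (Int × Int))
    (x idx : Int) (k : List Int) :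
    (bInsertTeam d x team idx).get? k =
      match d.get? k with
      | some v => some v
      | none => (tIdx team k idx).map (fun i => (x, i)) := by
  induction team generalizing d idx with
  | nil => cases h : d.get? k <;> simp [bInsertTeam, tIdx, h]
  | cons pos rest ih =>
    simp only [bInsertTeam, tIdx]
    by_cases hk : pos == k
    · have hpk : pos = k := eq_of_beq hk
      subst hpk
      by_cases hc : d.contains pos
      · have hs : (d.get? pos).isSome = true := by
          rw [← PySem.Dict.contains_eq_isSome_get?]; exact hc
        obtain ⟨v, hv⟩ := Option.isSome_iff_exists.mp hs
        rw [if_pos hc, ih, hv]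
      · have hdk : d.get? pos = none := by
          rw [PySem.Dict.get?_eq_none_iff_contains]; simpa using hc
        rw [if_neg hc, ih, PySem.Dict.get?_insert_self, hdk]
        simp
    · have hne : k ≠ pos := fun h => hk (by simp [h])
      by_cases hc : d.contains pos
      · rw [if_pos hc, ih]
        simp [hk]
      · rw [if_neg hc, ih, PySem.Dict.get?_insert_of_ne _ _ hne]
        simp [hk]

lemma bBuild_get? (teams : List (List (List Int))) (d : PySem.Dict (List Int) (Int × Int))
    (x : Int) (k : List Int) :
    (bBuild d x teams).get? k =
      match d.get? k with
      | some v => some v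
      | none => gFirst teams k x := by
  induction teams generalizing d x with
  | nil => cases h : d.get? k <;> simp [bBuild, gFirst, h]
  | cons team rest ih =>
    simp only [bBuild, gFirst]
    rw [ih, bInsertTeam_get? team d x 0 k]
    cases h : d.get? k with
    | some v => rfl
    | none => cases tIdx team k 0 <;> rfl

lemma aScanTeams_eq (teams : List (List (List Int))) (tpos : List Int) (x : Int) :
    aScanTeams teams tpos = (gFirst teams tpos x).map (fun p => (p.2 + 1) * (p.2 + 1)) := by
  induction teams generalizing x with
  | nil => rfl
  | cons team rest ih =>
    simp only [aScanTeams, gFirst, aFindTeam_eq]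
    cases tIdx team tpos 0
    · simpa using ih (x + 1)
    · rfl

lemma throw_ball_eq_bLookup (trajectory : List (List Int)) (teams : List (List (List Int))) :
    throw_ball trajectory teams = bLookup (bBuild PySem.Dict.empty 0 teams) trajectory := by
  induction trajectory with
  | nil => rfl
  | cons tpos rest ih =>
    simp only [throw_ball, bLookup]
    rw [bBuild_get? teams PySem.Dict.empty 0 tpos, PySem.Dict.get?_empty,
      aScanTeams_eq teams tpos 0]
    cases h : gFirst teams tpos 0 with
    | none => simpa using ih
    | some p => cases p; rfl

-- ===== VERDICT (by name: the statement is the Claim_ definition above) =====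
theorem throw_ball_spec : Claim_equal_throw_ball := by
  intro trajectory teams _
  unfold Spec_throw_ball throw_ball_alt
  exact throw_ball_eq_bLookup trajectory teams
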